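-- pv_equiv track=rewrite | github.com/hiagogabrielga/codigosPrimeiroAno | linguagem da programação/Funções com def/Exercicios/exercicio_07.py | relogio
-- ===== SOURCE A (Python) =====
-- def relogio(hhmm):
--     hh=hhmm.split(':')[0]
--     mm=hhmm.split(':')[1]
--     lista_d_n1=[str(i) for i in range (25)]
--     lista_d_n2=[str(i) for i in range (61)]
--     lista_d_n3=['00','01','02','03','04','05','06','07','08','09']
--     lista_d_n4=lista_d_n1 + lista_d_n3
--     lista_d_n5=lista_d_n2 + lista_d_n3
--
--     if lista_d_n4.count(hh) == 0:
--         return "Hora Inválida."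
--     if lista_d_n5.count(mm) == 0:
--         return "Hora Inválida."
--     else:
--         if hh == '01':
--             if mm == '00':
--                 return f'São {hh} hora em ponto.'
--             elif mm == '01':
--                 return f'São {hh} hora e {mm} mínuto.'
--
--             elif mm == '30':
--                 return f'São {hh} hora e meia.'
--
--             else:
--                 return f'São {hh} hora e {mm} mínutos.'
--
--         elif hh == '12':
--             if mm == '00':
--                 return f'São meio dia em ponto.'
--
--             elif mm == '01':
--                 return f'São meio dia e {mm} mínuto.'
--
--             elif mm == '30':
--                 return f'São meio dia e meia.'
--
--             else:
--                 return f'São meio dia e {mm} mínutos.'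
--         elif hh == '00':
--             if mm == '00':
--                 return f'São meia noite em ponto.'
--
--             elif mm == '01':
--                 return f'São meia noite e {mm} mínuto.'
--
--             elif mm == '30':
--                 return f'São meia noite e meia.'
--
--             else:
--                 return f'São meia noite e {mm} mínutos.'
--         elif mm == '01':
--                 return f'São {hh} horas e {mm} mínuto.'
--
--         elif mm == '30':
--             return f'São {hh} horas e meia.'
--
--         elif mm == '00':
--             return f'São {hh} horas em ponto.'
--
--         else:
--             return f'São {hh} horas e {mm} mínutos.'
-- ===== SOURCE B (Python) =====
-- def relogio(hhmm):
--     partes = hhmm.split(':')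
--     hh = partes[0]
--     mm = partes[1]
--     validos_hh = {str(i) for i in range(25)} | {str(i).zfill(2) for i in range(10)}
--     validos_mm = {str(i) for i in range(61)} | {str(i).zfill(2) for i in range(10)}
--     if hh not in validos_hh or mm not in validos_mm:
--         return "Hora Inválida."
--     hora = {'01': 'São 01 hora', '12': 'São meio dia', '00': 'São meia noite'}.get(hh, f'São {hh} horas')
--     if mm == '00':
--         sufixo = ' em ponto.'
--     elif mm == '01':
--         sufixo = f' e {mm} mínuto.'
--     elif mm == '30':
--         sufixo = ' e meia.'
--     else:
--         sufixo = f' e {mm} mínutos.'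
--     return hora + sufixo
-- ===== Notes on version B (the rewrite author's own statement) =====
-- stated objective: simpler
-- what changed: A's duplicated hh-by-mm nested cascade of 16 f-string branches is collapsed into set-membership validation plus two independent flat computations (an hour phrase from a 3-entry dict with a default, and a minute suffix from one 4-way branch) joined by a single concatenation.
import Mathlib
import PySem

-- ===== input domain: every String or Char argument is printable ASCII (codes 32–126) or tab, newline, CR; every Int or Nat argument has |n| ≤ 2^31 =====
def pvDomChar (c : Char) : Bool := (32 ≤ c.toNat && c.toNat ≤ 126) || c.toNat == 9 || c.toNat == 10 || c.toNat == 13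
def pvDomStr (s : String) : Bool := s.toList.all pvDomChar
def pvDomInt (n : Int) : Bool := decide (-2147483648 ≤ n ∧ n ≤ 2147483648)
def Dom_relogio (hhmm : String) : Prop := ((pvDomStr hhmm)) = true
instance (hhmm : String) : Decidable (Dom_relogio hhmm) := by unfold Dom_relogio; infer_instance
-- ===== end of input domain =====

-- B replaces A's duplicated hh×mm nested cascade by two independent flat branches (hour phrase + minute suffix) joined once; objective: simpler.

-- ===== PORT A =====
-- literal transliteration of A's body after hh/mm are split off
def relogioCoreA (hh mm : List Char) : List Char :=
  let lista_d_n1 := (PySem.List.pyRange 0 25 1).map PySem.Int.toChars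
  let lista_d_n2 := (PySem.List.pyRange 0 61 1).map PySem.Int.toChars
  let lista_d_n3 : List (List Char) := ["00".toList, "01".toList, "02".toList, "03".toList, "04".toList, "05".toList, "06".toList, "07".toList, "08".toList, "09".toList]
  let lista_d_n4 := lista_d_n1 ++ lista_d_n3
  let lista_d_n5 := lista_d_n2 ++ lista_d_n3
  if PySem.List.count lista_d_n4 hh = 0 then "Hora Inválida.".toList
  else if PySem.List.count lista_d_n5 mm = 0 then "Hora Inválida.".toList
  else if hh = "01".toList then
    if mm = "00".toList then "São ".toList ++ hh ++ " hora em ponto.".toList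
    else if mm = "01".toList then "São ".toList ++ hh ++ " hora e ".toList ++ mm ++ " mínuto.".toList
    else if mm = "30".toList then "São ".toList ++ hh ++ " hora e meia.".toList
    else "São ".toList ++ hh ++ " hora e ".toList ++ mm ++ " mínutos.".toList
  else if hh = "12".toList then
    if mm = "00".toList then "São meio dia em ponto.".toList
    else if mm = "01".toList then "São meio dia e ".toList ++ mm ++ " mínuto.".toList
    else if mm = "30".toList then "São meio dia e meia.".toList
    else "São meio dia e ".toList ++ mm ++ " mínutos.".toList
  else if hh = "00".toList then
    if mm = "00".toList then "São meia noite em ponto.".toList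
    else if mm = "01".toList then "São meia noite e ".toList ++ mm ++ " mínuto.".toList
    else if mm = "30".toList then "São meia noite e meia.".toList
    else "São meia noite e ".toList ++ mm ++ " mínutos.".toList
  else if mm = "01".toList then "São ".toList ++ hh ++ " horas e ".toList ++ mm ++ " mínuto.".toList
  else if mm = "30".toList then "São ".toList ++ hh ++ " horas e meia.".toList
  else if mm = "00".toList then "São ".toList ++ hh ++ " horas em ponto.".toList
  else "São ".toList ++ hh ++ " horas e ".toList ++ mm ++ " mínutos.".toList

def relogio (hhmm : String) : String :=
  let partes := (PySem.Chars.split? hhmm.toList [':']).getD []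
  match PySem.List.pyGet? partes 0, PySem.List.pyGet? partes 1 with
  | some hh, some mm => String.ofList (relogioCoreA hh mm)
  | _, _ => ""  -- Python raises IndexError here (no ':'); excluded by Pre_relogio

-- ===== PORT B =====
-- literal transliteration of B's body after hh/mm are split off
def relogioCoreB (hh mm : List Char) : List Char :=
  let validos_hh := PySem.Set.union (PySem.Set.ofList ((PySem.List.pyRange 0 25 1).map PySem.Int.toChars)) (PySem.Set.ofList ((PySem.List.pyRange 0 10 1).map (fun i => PySem.Chars.zfill (PySem.Int.toChars i) 2)))
  let validos_mm := PySem.Set.union (PySem.Set.ofList ((PySem.List.pyRange 0 61 1).map PySem.Int.toChars)) (PySem.Set.ofList ((PySem.List.pyRange 0 10 1).map (fun i => PySem.Chars.zfill (PySem.Int.toChars i) 2)))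
  if !PySem.Set.contains validos_hh hh || !PySem.Set.contains validos_mm mm then "Hora Inválida.".toList
  else
    let hora := PySem.Dict.getD (PySem.Dict.ofList [("01".toList, "São 01 hora".toList), ("12".toList, "São meio dia".toList), ("00".toList, "São meia noite".toList)]) hh ("São ".toList ++ hh ++ " horas".toList)
    let sufixo :=
      if mm = "00".toList then " em ponto.".toList
      else if mm = "01".toList then " e ".toList ++ mm ++ " mínuto.".toList
      else if mm = "30".toList then " e meia.".toList
      else " e ".toList ++ mm ++ " mínutos.".toList
    hora ++ sufixo

def relogio_alt (hhmm : String) : String :=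
  let partes := (PySem.Chars.split? hhmm.toList [':']).getD []
  match PySem.List.pyGet? partes 0 with
  | none => ""  -- Python raises IndexError here (no ':'); excluded by Pre_relogio
  | some hh =>
    match PySem.List.pyGet? partes 1 with
    | none => ""  -- Python raises IndexError here (no ':'); excluded by Pre_relogio
    | some mm => String.ofList (relogioCoreB hh mm)

-- ===== PRECONDITION & SPEC =====
-- Pre_ excludes exactly the inputs without ':', on which A's hhmm.split(':')[1] raises IndexError (B raises too).
def Pre_relogio (hhmm : String) : Prop := PySem.Str.isIn ":" hhmm = true
instance (hhmm : String) : Decidable (Pre_relogio hhmm) := by unfold Pre_relogio; infer_instance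
def pvWitness_relogio : String := "12:30"
def Spec_relogio (hhmm : String) (out : String) : Prop := out = relogio_alt hhmm
instance (hhmm : String) (out : String) : Decidable (Spec_relogio hhmm out) := by unfold Spec_relogio; infer_instance

-- ===== CLAIM (what is proved, stated in full; the proofs are below) =====
def Claim_equal_relogio : Prop := ∀ (hhmm : String), Dom_relogio hhmm → Pre_relogio hhmm → Spec_relogio hhmm (relogio hhmm)

-- ===== LEMMAS AND PROOFS =====
theorem set_contains_false_iff (la lb : List (List Char)) (s : List Char) :
    (PySem.Set.contains (PySem.Set.union (PySem.Set.ofList la) (PySem.Set.ofList lb)) s = false) ↔ PySem.List.count (la ++ lb) s = 0 := by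
  simp [PySem.List.count_eq, List.count_eq_zero, PySem.Set.mem_union, PySem.Set.mem_ofList]

theorem relogioCore_eq (hh mm : List Char) : relogioCoreA hh mm = relogioCoreB hh mm := by
  simp only [relogioCoreA, relogioCoreB]
  simp only [show (PySem.List.pyRange 0 10 1).map (fun i => PySem.Chars.zfill (PySem.Int.toChars i) 2) = ["00".toList, "01".toList, "02".toList, "03".toList, "04".toList, "05".toList, "06".toList, "07".toList, "08".toList, "09".toList] from by decide]
  generalize (PySem.List.pyRange 0 25 1).map PySem.Int.toChars = l1
  generalize (PySem.List.pyRange 0 61 1).map PySem.Int.toChars = l2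
  generalize (["00".toList, "01".toList, "02".toList, "03".toList, "04".toList, "05".toList, "06".toList, "07".toList, "08".toList, "09".toList] : List (List Char)) = l3
  by_cases h4 : PySem.List.count (l1 ++ l3) hh = 0
  · have b1 : PySem.Set.contains (PySem.Set.union (PySem.Set.ofList l1) (PySem.Set.ofList l3)) hh = false :=
      (set_contains_false_iff l1 l3 hh).mpr h4
    rw [if_pos h4, if_pos (show (!PySem.Set.contains (PySem.Set.union (PySem.Set.ofList l1) (PySem.Set.ofList l3)) hh || !PySem.Set.contains (PySem.Set.union (PySem.Set.ofList l2) (PySem.Set.ofList l3)) mm) = true by rw [b1]; simp)]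
  · have t1 : PySem.Set.contains (PySem.Set.union (PySem.Set.ofList l1) (PySem.Set.ofList l3)) hh = true := by
      rcases hcont : PySem.Set.contains (PySem.Set.union (PySem.Set.ofList l1) (PySem.Set.ofList l3)) hh
      · exact absurd ((set_contains_false_iff l1 l3 hh).mp hcont) h4
      · rfl
    by_cases h5 : PySem.List.count (l2 ++ l3) mm = 0
    · have b2 : PySem.Set.contains (PySem.Set.union (PySem.Set.ofList l2) (PySem.Set.ofList l3)) mm = false :=
        (set_contains_false_iff l2 l3 mm).mpr h5
      rw [if_neg h4, if_pos h5, if_pos (show (!PySem.Set.contains (PySem.Set.union (PySem.Set.ofList l1) (PySem.Set.ofList l3)) hh || !PySem.Set.contains (PySem.Set.union (PySem.Set.ofList l2) (PySem.Set.ofList l3)) mm) = true by rw [b2]; simp)]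
    · have t2 : PySem.Set.contains (PySem.Set.union (PySem.Set.ofList l2) (PySem.Set.ofList l3)) mm = true := by
        rcases hcont : PySem.Set.contains (PySem.Set.union (PySem.Set.ofList l2) (PySem.Set.ofList l3)) mm
        · exact absurd ((set_contains_false_iff l2 l3 mm).mp hcont) h5
        · rfl
      rw [if_neg h4, if_neg h5, if_neg (show ¬((!PySem.Set.contains (PySem.Set.union (PySem.Set.ofList l1) (PySem.Set.ofList l3)) hh || !PySem.Set.contains (PySem.Set.union (PySem.Set.ofList l2) (PySem.Set.ofList l3)) mm) = true) by rw [t1, t2]; simp)]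
      by_cases hhx : hh = ['0', '1']
      · subst hhx
        have hg : (PySem.Dict.ofList [(['0', '1'], ['S', 'ã', 'o', ' ', '0', '1', ' ', 'h', 'o', 'r', 'a']), (['1', '2'], ['S', 'ã', 'o', ' ', 'm', 'e', 'i', 'o', ' ', 'd', 'i', 'a']), (['0', '0'], ['S', 'ã', 'o', ' ', 'm', 'e', 'i', 'a', ' ', 'n', 'o', 'i', 't', 'e'])]).getD ['0', '1'] ['S', 'ã', 'o', ' ', '0', '1', ' ', 'h', 'o', 'r', 'a', 's'] = ['S', 'ã', 'o', ' ', '0', '1', ' ', 'h', 'o', 'r', 'a'] := by decide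
        by_cases m0 : mm = ['0', '0']
        · subst m0; decide
        · by_cases m1 : mm = ['0', '1']
          · subst m1; decide
          · by_cases m3 : mm = ['3', '0']
            · subst m3; decide
            · simp [m0, m1, m3, hg]
      · by_cases hhy : hh = ['1', '2']
        · subst hhy
          have hg : (PySem.Dict.ofList [(['0', '1'], ['S', 'ã', 'o', ' ', '0', '1', ' ', 'h', 'o', 'r', 'a']), (['1', '2'], ['S', 'ã', 'o', ' ', 'm', 'e', 'i', 'o', ' ', 'd', 'i', 'a']), (['0', '0'], ['S', 'ã', 'o', ' ', 'm', 'e', 'i', 'a', ' ', 'n', 'o', 'i', 't', 'e'])]).getD ['1', '2'] ['S', 'ã', 'o', ' ', '1', '2', ' ', 'h', 'o', 'r', 'a', 's'] = ['S', 'ã', 'o', ' ', 'm', 'e', 'i', 'o', ' ', 'd', 'i', 'a'] := by decide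
          by_cases m0 : mm = ['0', '0']
          · subst m0; decide
          · by_cases m1 : mm = ['0', '1']
            · subst m1; decide
            · by_cases m3 : mm = ['3', '0']
              · subst m3; decide
              · simp [m0, m1, m3, hg]
        · by_cases hhz : hh = ['0', '0']
          · subst hhz
            have hg : (PySem.Dict.ofList [(['0', '1'], ['S', 'ã', 'o', ' ', '0', '1', ' ', 'h', 'o', 'r', 'a']), (['1', '2'], ['S', 'ã', 'o', ' ', 'm', 'e', 'i', 'o', ' ', 'd', 'i', 'a']), (['0', '0'], ['S', 'ã', 'o', ' ', 'm', 'e', 'i', 'a', ' ', 'n', 'o', 'i', 't', 'e'])]).getD ['0', '0'] ['S', 'ã', 'o', ' ', '0', '0', ' ', 'h', 'o', 'r', 'a', 's'] = ['S', 'ã', 'o', ' ', 'm', 'e', 'i', 'a', ' ', 'n', 'o', 'i', 't', 'e'] := by decide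
            by_cases m0 : mm = ['0', '0']
            · subst m0; decide
            · by_cases m1 : mm = ['0', '1']
              · subst m1; decide
              · by_cases m3 : mm = ['3', '0']
                · subst m3; decide
                · simp [m0, m1, m3, hg]
          · have hg : (PySem.Dict.ofList [(['0', '1'], ['S', 'ã', 'o', ' ', '0', '1', ' ', 'h', 'o', 'r', 'a']), (['1', '2'], ['S', 'ã', 'o', ' ', 'm', 'e', 'i', 'o', ' ', 'd', 'i', 'a']), (['0', '0'], ['S', 'ã', 'o', ' ', 'm', 'e', 'i', 'a', ' ', 'n', 'o', 'i', 't', 'e'])]).contains hh = false := by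
              rw [show (PySem.Dict.ofList [(['0', '1'], ['S', 'ã', 'o', ' ', '0', '1', ' ', 'h', 'o', 'r', 'a']), (['1', '2'], ['S', 'ã', 'o', ' ', 'm', 'e', 'i', 'o', ' ', 'd', 'i', 'a']), (['0', '0'], ['S', 'ã', 'o', ' ', 'm', 'e', 'i', 'a', ' ', 'n', 'o', 'i', 't', 'e'])]) = PySem.Dict.mk [(['0', '1'], ['S', 'ã', 'o', ' ', '0', '1', ' ', 'h', 'o', 'r', 'a']), (['1', '2'], ['S', 'ã', 'o', ' ', 'm', 'e', 'i', 'o', ' ', 'd', 'i', 'a']), (['0', '0'], ['S', 'ã', 'o', ' ', 'm', 'e', 'i', 'a', ' ', 'n', 'o', 'i', 't', 'e'])] from by decide]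
              simp [PySem.Dict.contains_mk]
              exact ⟨fun h => hhx h.symm, fun h => hhy h.symm, fun h => hhz h.symm⟩
            by_cases m0 : mm = ['0', '0']
            · subst m0; simp [hhx, hhy, hhz, PySem.Dict.getD_of_not_contains _ _ hg, List.append_assoc]
            · by_cases m1 : mm = ['0', '1']
              · subst m1; simp [hhx, hhy, hhz, PySem.Dict.getD_of_not_contains _ _ hg, List.append_assoc]
              · by_cases m3 : mm = ['3', '0']
                · subst m3; simp [hhx, hhy, hhz, PySem.Dict.getD_of_not_contains _ _ hg, List.append_assoc]
                · simp [hhx, hhy, hhz, m0, m1, m3, PySem.Dict.getD_of_not_contains _ _ hg, List.append_assoc]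

-- ===== VERDICT (by name: the statement is the Claim_ definition above) =====
theorem relogio_spec : Claim_equal_relogio := by
  intro hhmm _ _
  unfold Spec_relogio relogio relogio_alt
  cases h0 : PySem.List.pyGet? ((PySem.Chars.split? hhmm.toList [':']).getD []) 0 <;>
    cases h1 : PySem.List.pyGet? ((PySem.Chars.split? hhmm.toList [':']).getD []) 1 <;>
    simp [h0, h1, relogioCore_eq]
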